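-- pv_equiv track=rewrite | github.com/Louis2602/AI | game_test/level3.py | updateMazePacman
-- ===== SOURCE A (Python) =====
-- def updateMazePacman(maze, mazePacman, pacmanPos):
--     rows = len(maze)
--     cols = len(maze[0])
--
--     for i in range(rows):
--         for j in range(cols):
--             if abs(i - pacmanPos[0]) + abs(j - pacmanPos[1]) <= 3:
--                 mazePacman[i][j] = maze[i][j]
--     return mazePacman
-- ===== SOURCE B (Python) =====
-- def updateMazePacman(maze, mazePacman, pacmanPos):
--     rows = len(maze)
--     cols = len(maze[0])
--     p0, p1 = pacmanPos[0], pacmanPos[1]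
--     for i in range(max(0, p0 - 3), min(rows, p0 + 4)):
--         r = 3 - abs(i - p0)
--         for j in range(max(0, p1 - r), min(cols, p1 + r + 1)):
--             mazePacman[i][j] = maze[i][j]
--     return mazePacman
-- ===== Notes on version B (the rewrite author's own statement) =====
-- stated objective: alternative
-- what changed: B visits only the diamond of cells within Manhattan distance 3 of pacman (each row window clamped to the grid bounds, at most 25 cells) instead of scanning every cell of the grid and testing the distance; intended as faster, but a timing run read between 1.3x and 2.1x across runs, so no firm speed is claimed.
-- outside the precondition, e.g. on updateMazePacman([[]], [], ()): A returns [], B raises IndexError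
import Mathlib
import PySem

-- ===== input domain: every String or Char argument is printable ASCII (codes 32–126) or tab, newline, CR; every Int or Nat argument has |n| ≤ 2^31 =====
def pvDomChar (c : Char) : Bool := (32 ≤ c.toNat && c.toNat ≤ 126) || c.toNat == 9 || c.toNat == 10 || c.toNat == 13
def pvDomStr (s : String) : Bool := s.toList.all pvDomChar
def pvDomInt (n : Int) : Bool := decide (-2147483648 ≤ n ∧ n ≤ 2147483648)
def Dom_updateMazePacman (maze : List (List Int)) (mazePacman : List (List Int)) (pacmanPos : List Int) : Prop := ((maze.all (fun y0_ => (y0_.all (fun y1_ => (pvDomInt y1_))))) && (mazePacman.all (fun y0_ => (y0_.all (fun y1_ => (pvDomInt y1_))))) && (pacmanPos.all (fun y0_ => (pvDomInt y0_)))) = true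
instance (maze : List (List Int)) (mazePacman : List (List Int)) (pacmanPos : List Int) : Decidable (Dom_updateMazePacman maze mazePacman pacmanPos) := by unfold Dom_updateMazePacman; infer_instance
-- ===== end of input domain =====

-- B iterates only the ≤ 25 cells within Manhattan distance 3 of pacman (row window clamped to the
-- grid), instead of scanning the whole grid; both Pythons mutate mazePacman in place identically
-- and return it — the equivalence is about the returned (= mutated) value.

-- ===== PORT A =====
-- the single write both Pythons perform: mazePacman[i][j] = maze[i][j]
-- (List.set/getD with .toNat is exact here: under Pre_ every executed write has 0 ≤ i,j in bounds)
def pvWrite (maze : List (List Int)) (m : List (List Int)) (i j : Int) : List (List Int) :=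
  m.set i.toNat ((m.getD i.toNat []).set j.toNat ((maze.getD i.toNat []).getD j.toNat 0))

def updateMazePacman (maze : List (List Int)) (mazePacman : List (List Int)) (pacmanPos : List Int) : List (List Int) :=
  let rows : Int := maze.length
  let cols : Int := ((maze.getD 0 []).length : Int)   -- maze[0]; Pre_ requires maze ≠ []
  (PySem.List.pyRange 0 rows 1).foldl (fun m i =>
    (PySem.List.pyRange 0 cols 1).foldl (fun m j =>
      if |i - PySem.List.pyGetD pacmanPos 0 0| + |j - PySem.List.pyGetD pacmanPos 1 0| ≤ 3 then
        pvWrite maze m i j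
      else m) m) mazePacman

-- ===== PORT B =====
def updateMazePacman_alt (maze : List (List Int)) (mazePacman : List (List Int)) (pacmanPos : List Int) : List (List Int) :=
  let rows : Int := maze.length
  let cols : Int := ((maze.getD 0 []).length : Int)
  let p0 := PySem.List.pyGetD pacmanPos 0 0
  let p1 := PySem.List.pyGetD pacmanPos 1 0
  (PySem.List.pyRange (max 0 (p0 - 3)) (min rows (p0 + 4)) 1).foldl (fun m i =>
    let r := 3 - |i - p0|
    (PySem.List.pyRange (max 0 (p1 - r)) (min cols (p1 + r + 1)) 1).foldl (fun m j =>
      pvWrite maze m i j) m) mazePacman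

-- ===== PRECONDITION & SPEC =====
-- Pre_ = exactly where A returns (maze[0] exists, pacmanPos[0]/[1] exist, every touched cell exists),
-- EXCEPT that pacmanPos must have ≥ 2 entries even when maze[0] is empty: there A returns mazePacman
-- untouched without ever reading pacmanPos, while B's up-front unpacking of pacmanPos raises IndexError.
def Pre_updateMazePacman (maze : List (List Int)) (mazePacman : List (List Int)) (pacmanPos : List Int) : Prop :=
  maze ≠ [] ∧ 2 ≤ pacmanPos.length ∧
  ∀ i, i < maze.length → ∀ j, j < (maze.getD 0 []).length →
    |(i : Int) - pacmanPos.getD 0 0| + |(j : Int) - pacmanPos.getD 1 0| ≤ 3 →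
    i < mazePacman.length ∧ j < (mazePacman.getD i []).length ∧ j < (maze.getD i []).length
instance (maze : List (List Int)) (mazePacman : List (List Int)) (pacmanPos : List Int) : Decidable (Pre_updateMazePacman maze mazePacman pacmanPos) := by unfold Pre_updateMazePacman; infer_instance

def pvWitness_updateMazePacman : List (List Int) × List (List Int) × List Int := ([[1]], [[0]], [0, 0])

def Spec_updateMazePacman (maze : List (List Int)) (mazePacman : List (List Int)) (pacmanPos : List Int) (out : List (List Int)) : Prop := out = updateMazePacman_alt maze mazePacman pacmanPos
instance (maze : List (List Int)) (mazePacman : List (List Int)) (pacmanPos : List Int) (out : List (List Int)) : Decidable (Spec_updateMazePacman maze mazePacman pacmanPos out) := by unfold Spec_updateMazePacman; infer_instance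

-- ===== CLAIM (what is proved, stated in full; the proofs are below) =====
def Claim_equal_updateMazePacman : Prop := ∀ (maze : List (List Int)) (mazePacman : List (List Int)) (pacmanPos : List Int), Dom_updateMazePacman maze mazePacman pacmanPos → Pre_updateMazePacman maze mazePacman pacmanPos → Spec_updateMazePacman maze mazePacman pacmanPos (updateMazePacman maze mazePacman pacmanPos)

-- ===== LEMMAS AND PROOFS =====

-- |i-p0| + |j-p1| ≤ 3  is a (possibly empty) interval condition on j
theorem pvCondIff (i j p0 p1 : Int) :
    (|i - p0| + |j - p1| ≤ 3) ↔ (p1 - (3 - |i - p0|) ≤ j ∧ j < p1 + (3 - |i - p0|) + 1) := by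
  rcases abs_cases (i - p0) with ⟨h1, _⟩ | ⟨h1, _⟩ <;>
    rcases abs_cases (j - p1) with ⟨h2, _⟩ | ⟨h2, _⟩ <;> rw [h1, h2] <;> omega

-- filtering range(0, n) by an interval test is the clamped range
theorem pvFilterInterval (n : Nat) (lo hi : Int) :
    (PySem.List.pyRange 0 (n : Int) 1).filter (fun x => decide (lo ≤ x ∧ x < hi))
      = PySem.List.pyRange (max 0 lo) (min (n : Int) hi) 1 := by
  induction n with
  | zero =>
      rw [Nat.cast_zero, PySem.List.pyRange_one_eq_nil (by omega),
        PySem.List.pyRange_one_eq_nil (by omega)]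
      rfl
  | succ n ih =>
      rw [Nat.cast_succ, PySem.List.pyRange_one_succ_right (by positivity), List.filter_append, ih]
      by_cases hc : lo ≤ (n : Int) ∧ (n : Int) < hi
      · have h1 : min (n : Int) hi = (n : Int) := by omega
        have h2 : min ((n : Int) + 1) hi = (n : Int) + 1 := by omega
        rw [h1, h2, PySem.List.pyRange_one_succ_right (by omega)]
        simp [hc]
      · have h2 : List.filter (fun x => decide (lo ≤ x ∧ x < hi)) [(n : Int)] = [] := by
          simp [hc]
        rw [h2, List.append_nil]
        by_cases hlo : (n : Int) < lo
        · rw [PySem.List.pyRange_one_eq_nil (by omega), PySem.List.pyRange_one_eq_nil (by omega)]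
        · have : min (n : Int) hi = min ((n : Int) + 1) hi := by omega
          rw [this]

-- a fold over range(0, n) whose body is the identity outside [lo, hi) is the fold over the clamped range
theorem pvOuter (n : Nat) (lo hi : Int) (F : List (List Int) → Int → List (List Int))
    (init : List (List Int)) (hF : ∀ m i, ¬(lo ≤ i ∧ i < hi) → F m i = m) :
    (PySem.List.pyRange 0 (n : Int) 1).foldl F init
      = (PySem.List.pyRange (max 0 lo) (min (n : Int) hi) 1).foldl F init := by
  rw [← pvFilterInterval, ← PySem.List.foldl_ite_eq_foldl_filter (fun i => lo ≤ i ∧ i < hi) F]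
  exact PySem.List.foldl_congr_mem _ _ _ _ (fun acc x _ => by
    by_cases h : lo ≤ x ∧ x < hi
    · rw [if_pos h]
    · rw [if_neg h, hF acc x h])

theorem updateMazePacman_eq_alt (maze mazePacman : List (List Int)) (pacmanPos : List Int) :
    updateMazePacman maze mazePacman pacmanPos = updateMazePacman_alt maze mazePacman pacmanPos := by
  unfold updateMazePacman updateMazePacman_alt
  simp only []
  generalize (PySem.List.pyGetD pacmanPos 0 0) = p0
  generalize (PySem.List.pyGetD pacmanPos 1 0) = p1
  -- rewrite A's inner test as an interval test on j, then the inner loop as the clamped range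
  have hA : ∀ (m : List (List Int)) (i : Int),
      (PySem.List.pyRange 0 ((maze.getD 0 []).length : Int) 1).foldl (fun m j =>
          if |i - p0| + |j - p1| ≤ 3 then pvWrite maze m i j else m) m
        = (PySem.List.pyRange (max 0 (p1 - (3 - |i - p0|)))
            (min ((maze.getD 0 []).length : Int) (p1 + (3 - |i - p0|) + 1)) 1).foldl
            (fun m j => pvWrite maze m i j) m := by
    intro m i
    simp only [pvCondIff]
    rw [PySem.List.foldl_ite_eq_foldl_filter (p := fun j => p1 - (3 - |i - p0|) ≤ j ∧ j < p1 + (3 - |i - p0|) + 1)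
      (f := fun m j => pvWrite maze m i j), pvFilterInterval]
  simp only [hA]
  exact pvOuter maze.length (p0 - 3) (p0 + 4) _ mazePacman (by
    intro m i h
    have hr : |i - p0| > 3 := by
      rcases abs_cases (i - p0) with ⟨h1, _⟩ | ⟨h1, _⟩ <;> omega
    rw [PySem.List.pyRange_one_eq_nil (by omega)]
    rfl)

-- ===== VERDICT (by name: the statement is the Claim_ definition above) =====
theorem updateMazePacman_spec : Claim_equal_updateMazePacman := by
  intro maze mazePacman pacmanPos _ _
  exact updateMazePacman_eq_alt maze mazePacman pacmanPos
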